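-- pv_equiv track=rewrite | github.com/higor-gomes93/curso_programacao_python_udemy | Sessão 8 - Exercícios/ex33.py | soma_fatorial
-- ===== SOURCE A (Python) =====
-- def soma_fatorial(numero):
--     fatorial = 1
--     soma = 0
--     for i in range(1, numero+1):
--         fatorial *= i
--     fatorial = str(fatorial)
--     for i in fatorial:
--         i = int(i)
--         soma += i
--     return f'A soma dos algarismos de {fatorial} é {soma}'
-- ===== SOURCE B (Python) =====
-- def soma_fatorial(numero):
--     fatorial = 1
--     for i in range(numero, 1, -1):
--         fatorial *= i
--     soma = 0
--     n = fatorial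
--     while n > 0:
--         n, r = divmod(n, 10 ** 4950)
--         while r > 0:
--             r, q = divmod(r, 10 ** 9)
--             while q > 0:
--                 q, d = divmod(q, 10)
--                 soma += d
--     return f'A soma dos algarismos de {fatorial} é {soma}'
-- ===== Notes on version B (the rewrite author's own statement) =====
-- stated objective: alternative
-- what changed: B multiplies the range downwards and computes the digit sum arithmetically with a chunked divmod loop (split off blocks of 4950 then 9 digits, then divmod by 10) instead of converting the factorial to a string and summing int(char) over its characters; the decimal string is built only for the final message.
import Mathlib
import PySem

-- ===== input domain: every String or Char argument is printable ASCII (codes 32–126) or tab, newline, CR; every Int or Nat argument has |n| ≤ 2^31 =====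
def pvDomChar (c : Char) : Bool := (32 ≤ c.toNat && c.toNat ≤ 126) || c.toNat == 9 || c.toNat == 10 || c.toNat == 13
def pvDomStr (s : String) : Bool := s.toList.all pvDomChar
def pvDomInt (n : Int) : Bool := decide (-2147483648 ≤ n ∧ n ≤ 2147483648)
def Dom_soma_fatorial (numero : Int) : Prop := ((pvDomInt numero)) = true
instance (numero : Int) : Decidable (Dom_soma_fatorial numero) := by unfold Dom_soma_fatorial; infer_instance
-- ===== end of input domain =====

-- B replaces the character loop over str(fatorial) by an arithmetic divmod-by-10 loop
-- and multiplies the range downwards; same return value, no speed claim.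

-- ===== PORT A =====
-- int(i) in A's loop is applied only to decimal digit characters of str(fatorial),
-- where PySem.Int.ofStr? always returns some value; .getD 0 is exact there.
def soma_fatorial (numero : Int) : String :=
  let fatorial : Int := (PySem.List.pyRange 1 (numero + 1) 1).foldl (fun acc i => acc * i) 1
  let fatorialS : String := PySem.Int.toStr fatorial
  let soma : Int := fatorialS.toList.foldl
    (fun soma c => soma + (PySem.Int.ofStr? (String.ofList [c])).getD 0) 0
  "A soma dos algarismos de " ++ fatorialS ++ " é " ++ PySem.Int.toStr soma

-- ===== PORT B =====
-- termination measure for the three divmod loops of Source B (cited by decreasing_by)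
theorem pvFloordiv_toNat_lt {n d : Int} (hn : 0 < n) (hd : 1 < d) :
    (PySem.Int.floordiv n d).toNat < n.toNat := by
  rw [PySem.Int.floordiv_eq_ediv_of_pos (by omega)]
  have h0 := Int.mul_ediv_add_emod n d
  have h1 := Int.emod_nonneg n (by omega : d ≠ 0)
  have h2 : 0 ≤ n / d := Int.ediv_nonneg (by omega) (by omega)
  have h3 : n / d < n := by nlinarith
  omega

-- the innermost `while q > 0: q, d = divmod(q, 10); soma += d` loop of Source B
def pvDigitLoop (n soma : Int) : Int :=
  if h : 0 < n then pvDigitLoop (PySem.Int.floordiv n 10) (soma + PySem.Int.mod n 10) else soma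
termination_by n.toNat
decreasing_by exact pvFloordiv_toNat_lt h (by norm_num)

-- the middle `while r > 0: r, q = divmod(r, 10 ** 9); …` loop of Source B
def pvMidLoop (n soma : Int) : Int :=
  if h : 0 < n then pvMidLoop (PySem.Int.floordiv n 1000000000) (pvDigitLoop (PySem.Int.mod n 1000000000) soma) else soma
termination_by n.toNat
decreasing_by exact pvFloordiv_toNat_lt h (by norm_num)

-- the outer `while n > 0: n, r = divmod(n, 10 ** 4950); …` loop of Source B
def pvOuterLoop (n soma : Int) : Int :=
  if h : 0 < n then pvOuterLoop (PySem.Int.floordiv n (10 ^ 4950)) (pvMidLoop (PySem.Int.mod n (10 ^ 4950)) soma) else soma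
termination_by n.toNat
decreasing_by
  refine pvFloordiv_toNat_lt h ?_
  calc (1:Int) < 10 ^ 1 := by norm_num
    _ ≤ 10 ^ 4950 := by gcongr <;> norm_num

def soma_fatorial_alt (numero : Int) : String :=
  let fatorial : Int := (PySem.List.pyRange numero 1 (-1)).foldl (fun acc i => acc * i) 1
  let soma : Int := pvOuterLoop fatorial 0
  "A soma dos algarismos de " ++ PySem.Int.toStr fatorial ++ " é " ++ PySem.Int.toStr soma

-- ===== PRECONDITION & SPEC =====
def Spec_soma_fatorial (numero : Int) (out : String) : Prop := out = soma_fatorial_alt numero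
instance (numero : Int) (out : String) : Decidable (Spec_soma_fatorial numero out) := by unfold Spec_soma_fatorial; infer_instance

-- ===== CLAIM (what is proved, stated in full; the proofs are below) =====
def Claim_equal_soma_fatorial : Prop := ∀ (numero : Int), Dom_soma_fatorial numero → Spec_soma_fatorial numero (soma_fatorial numero)

-- ===== LEMMAS AND PROOFS =====

-- the two factorial loops compute the same product
theorem pvProd_eq (n : Int) :
    (PySem.List.pyRange n 1 (-1)).foldl (fun acc i => acc * i) 1
      = (PySem.List.pyRange 1 (n + 1) 1).foldl (fun acc i => acc * i) 1 := by
  have h1 : ∀ l : List Int, l.foldl (fun acc i => acc * i) 1 = l.prod := by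
    intro l; rw [List.prod_eq_foldl]
  rw [h1, h1, PySem.List.pyRange_neg_one_eq_reverse, List.prod_reverse]
  by_cases h : n ≤ 0
  · rw [PySem.List.pyRange_one_eq_nil (by omega), PySem.List.pyRange_one_eq_nil (by omega)]
  · rw [PySem.List.pyRange_one_cons (by omega : (1:Int) < n + 1), List.prod_cons, one_mul]

theorem pvOne_le_prod (n : Int) :
    1 ≤ (PySem.List.pyRange 1 (n + 1) 1).foldl (fun acc i => acc * i) 1 := by
  have key : ∀ l : List Int, (∀ x ∈ l, 1 ≤ x) → ∀ acc : Int, 1 ≤ acc →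
      1 ≤ l.foldl (fun acc i => acc * i) acc := by
    intro l
    induction l with
    | nil => intro _ acc hacc; simpa using hacc
    | cons x xs ih =>
      intro hx acc hacc
      simp only [List.foldl_cons]
      exact ih (fun y hy => hx y (List.mem_cons_of_mem _ hy)) _
        (by nlinarith [hx x List.mem_cons_self])
  refine key _ ?_ 1 le_rfl
  intro x hx
  exact (PySem.List.mem_pyRange_one.mp hx).1

-- digit sum of a natural number, least-significant first
def pvNatDigitSum (n : Nat) : Nat :=
  if h : n = 0 then 0 else n % 10 + pvNatDigitSum (n / 10)
termination_by n
decreasing_by exact Nat.div_lt_self (Nat.pos_of_ne_zero h) (by norm_num)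

-- value A's loop body extracts from one character
def pvVal (c : Char) : Int := (PySem.Int.ofStr? (String.ofList [c])).getD 0

theorem pvVal_digitChar (d : Nat) (h : d < 10) : pvVal (Nat.digitChar d) = (d : Int) := by
  interval_cases d <;> decide

theorem pvToDigitsCore_sum (f : Nat) :
    ∀ (n : Nat) (ds : List Char), n < f →
      ((Nat.toDigitsCore 10 f n ds).map pvVal).sum
        = ((n % 10 + pvNatDigitSum (n / 10) : Nat) : Int) + ((ds.map pvVal).sum) := by
  induction f with
  | zero => intro n ds h; omega
  | succ f ih =>
    intro n ds h
    rw [Nat.toDigitsCore]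
    by_cases h0 : n / 10 = 0
    · simp only [h0, if_true]
      rw [List.map_cons, List.sum_cons, pvVal_digitChar _ (Nat.mod_lt _ (by norm_num))]
      rw [pvNatDigitSum]
      simp
    · simp only [if_neg h0]
      have hlt : n / 10 < f := by
        have := Nat.div_lt_self (Nat.pos_of_ne_zero (by omega : n ≠ 0)) (by norm_num : 1 < 10)
        omega
      rw [ih _ _ hlt]
      rw [List.map_cons, List.sum_cons, pvVal_digitChar _ (Nat.mod_lt _ (by norm_num))]
      conv_rhs => rw [pvNatDigitSum]
      simp only [dif_neg h0]
      push_cast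
      ring

theorem pvToDigits_sum (n : Nat) :
    ((Nat.toDigits 10 n).map pvVal).sum = ((n % 10 + pvNatDigitSum (n / 10) : Nat) : Int) := by
  have := pvToDigitsCore_sum (n + 1) n [] (by omega)
  simpa [Nat.toDigits] using this

theorem pvDigitLoop_eq (n : Nat) : ∀ s : Int, pvDigitLoop (n : Int) s = s + (pvNatDigitSum n : Int) := by
  induction n using Nat.strong_induction_on with
  | _ n ih =>
    intro s
    rw [pvDigitLoop]
    by_cases h0 : n = 0
    · subst h0; simp [pvNatDigitSum]
    · rw [dif_pos (by exact_mod_cast Nat.pos_of_ne_zero h0)]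
      rw [PySem.Int.floordiv_eq_ediv_of_pos (by norm_num : (0:Int) < 10),
        PySem.Int.mod_eq_emod_of_pos (by norm_num : (0:Int) < 10)]
      have h1 := ih (n / 10) (Nat.div_lt_self (Nat.pos_of_ne_zero h0) (by norm_num))
        (s + ((n % 10 : Nat) : Int))
      push_cast at h1
      rw [h1]
      conv_rhs => rw [pvNatDigitSum]
      simp only [dif_neg h0]
      push_cast
      ring

theorem pvFoldl_sum (cs : List Char) : ∀ s : Int,
    cs.foldl (fun soma c => soma + (PySem.Int.ofStr? (String.ofList [c])).getD 0) s
      = s + (cs.map pvVal).sum := by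
  induction cs with
  | nil => intro s; simp
  | cons c cs ih =>
    intro s
    simp only [List.foldl_cons, List.map_cons, List.sum_cons, ih]
    show s + pvVal c + _ = _
    ring

theorem pvNatDigitSum_zero : pvNatDigitSum 0 = 0 := by simp [pvNatDigitSum]

-- the digit sum splits at any power-of-ten chunk boundary
theorem pvSplit (k : Nat) : ∀ N : Nat,
    pvNatDigitSum N = pvNatDigitSum (N % 10 ^ k) + pvNatDigitSum (N / 10 ^ k) := by
  induction k with
  | zero => intro N; simp [pvNatDigitSum_zero, Nat.mod_one]
  | succ k ih =>
    intro N
    by_cases hN : N = 0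
    · subst hN; simp [pvNatDigitSum_zero]
    · have e1 : N / 10 / 10 ^ k = N / 10 ^ (k + 1) := by
        rw [Nat.div_div_eq_div_mul, pow_succ]; ring_nf
      have e2 : N / 10 % 10 ^ k = N % 10 ^ (k + 1) / 10 := by
        rw [pow_succ']
        exact (Nat.mod_mul_right_div_self N 10 (10 ^ k)).symm
      have e3 : N % 10 ^ (k + 1) % 10 = N % 10 :=
        Nat.mod_mod_of_dvd N (dvd_pow_self 10 (Nat.succ_ne_zero k))
      rw [pvNatDigitSum, dif_neg hN, ih (N / 10), e1, e2]
      by_cases hM : N % 10 ^ (k + 1) = 0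
      · have h5 : N % 10 = 0 := by rw [← e3, hM, Nat.zero_mod]
        simp [hM, h5, pvNatDigitSum_zero]
      · conv_rhs => rw [pvNatDigitSum]
        rw [dif_neg hM, e3]
        omega

-- the middle loop adds the digit sum of its argument
theorem pvMidLoop_eq (n : Nat) : ∀ s : Int, pvMidLoop (n : Int) s = s + (pvNatDigitSum n : Int) := by
  induction n using Nat.strong_induction_on with
  | _ n ih =>
    intro s
    rw [pvMidLoop]
    by_cases h0 : n = 0
    · subst h0; simp [pvNatDigitSum_zero]
    · rw [dif_pos (by exact_mod_cast Nat.pos_of_ne_zero h0)]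
      rw [PySem.Int.floordiv_eq_ediv_of_pos (by norm_num : (0:Int) < 1000000000),
        PySem.Int.mod_eq_emod_of_pos (by norm_num : (0:Int) < 1000000000)]
      have h1 := ih (n / 10 ^ 9)
        (Nat.div_lt_self (Nat.pos_of_ne_zero h0) (by norm_num))
        (pvDigitLoop (((n % 10 ^ 9 : Nat) : Int)) s)
      have h2 := pvDigitLoop_eq (n % 10 ^ 9) s
      push_cast at h1 h2
      rw [h1, h2]
      have h3 := pvSplit 9 n
      norm_num at h3
      omega

-- the outer loop computes the digit sum
theorem pvOuterLoop_eq (n : Nat) : ∀ s : Int, pvOuterLoop (n : Int) s = s + (pvNatDigitSum n : Int) := by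
  induction n using Nat.strong_induction_on with
  | _ n ih =>
    intro s
    rw [pvOuterLoop]
    by_cases h0 : n = 0
    · subst h0; simp [pvNatDigitSum_zero]
    · rw [dif_pos (by exact_mod_cast Nat.pos_of_ne_zero h0)]
      rw [PySem.Int.floordiv_eq_ediv_of_pos (by positivity : (0:Int) < 10 ^ 4950),
        PySem.Int.mod_eq_emod_of_pos (by positivity : (0:Int) < 10 ^ 4950)]
      have h1 := ih (n / 10 ^ 4950)
        (Nat.div_lt_self (Nat.pos_of_ne_zero h0) (by norm_num))
        (pvMidLoop (((n % 10 ^ 4950 : Nat) : Int)) s)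
      have h2 := pvMidLoop_eq (n % 10 ^ 4950) s
      push_cast at h1 h2
      rw [h1, h2]
      have h3 := pvSplit 4950 n
      omega

-- the two digit sums agree on every positive integer
theorem pvSoma_eq (m : Int) (hm : 1 ≤ m) :
    (PySem.Int.toStr m).toList.foldl
        (fun soma c => soma + (PySem.Int.ofStr? (String.ofList [c])).getD 0) 0
      = pvOuterLoop m 0 := by
  obtain ⟨N, rfl⟩ : ∃ N : Nat, m = (N : Int) := ⟨m.toNat, by omega⟩
  rw [PySem.Int.toList_toStr, pvFoldl_sum, zero_add, pvOuterLoop_eq, zero_add]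
  have hchars : PySem.Int.toChars (N : Int) = Nat.toDigits 10 N := by
    rw [PySem.Int.toChars, if_neg (by omega : ¬ ((N : Int) < 0)), Int.toNat_natCast]
  rw [hchars, pvToDigits_sum]
  conv_rhs => rw [pvNatDigitSum]
  rw [dif_neg (by omega : ¬ N = 0)]

-- ===== VERDICT (by name: the statement is the Claim_ definition above) =====
theorem soma_fatorial_spec : Claim_equal_soma_fatorial := by
  intro numero _
  unfold Spec_soma_fatorial soma_fatorial soma_fatorial_alt
  dsimp only
  rw [pvProd_eq]
  rw [pvSoma_eq _ (pvOne_le_prod numero)]
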